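-- pv_equiv track=rewrite | github.com/KylerAKAnderson/muver | muver/variant.py | get_possible_genotypes
-- ===== SOURCE A (Python) =====
-- import copy
--
-- def get_possible_genotypes(ploidy, alleles):
--     '''
--     For given ploidy and alleles, return a list of all possible genotypes.
--     '''
--     possible_genotypes = []
--
--     genotypes = [[]]
--     for i in range(ploidy):
--         temp_genotypes = []
--         for allele in alleles:
--             for genotype in genotypes:
--                 temp_genotype = copy.deepcopy(genotype)
--                 temp_genotype.append(allele)
--                 temp_genotypes.append(temp_genotype)
--         genotypes = copy.deepcopy(temp_genotypes)
--
--     for genotype in genotypes: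
--         _sorted = tuple(sorted(genotype, key=lambda x: alleles.index(x)))
--         if _sorted not in possible_genotypes:
--             possible_genotypes.append(_sorted)
--
--     return possible_genotypes
-- ===== SOURCE B (Python) =====
-- def get_possible_genotypes(ploidy, alleles):
--     '''
--     For given ploidy and alleles, return a list of all possible genotypes.
--     '''
--     distinct = []
--     for a in alleles:
--         if a not in distinct:
--             distinct.append(a)
--
--     def combos(k, pool):
--         # genotypes of size k drawing (with repetition) from pool, nondecreasing
--         if k <= 0:
--             return [()]
--         if not pool:
--             return []
--         with_head = [(pool[0],) + rest for rest in combos(k - 1, pool)]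
--         return with_head + combos(k, pool[1:])
--
--     return combos(ploidy, distinct)
-- ===== Notes on version B (the rewrite author's own statement) =====
-- stated objective: faster
-- what changed: Instead of materialising all len(alleles)^ploidy ordered tuples, deep-copying them each round, sorting every tuple and deduplicating with a quadratic membership scan, B dedups the alleles once and generates exactly the sorted combinations-with-replacement by a direct head/tail recursion, producing each output genotype once.
import Mathlib
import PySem

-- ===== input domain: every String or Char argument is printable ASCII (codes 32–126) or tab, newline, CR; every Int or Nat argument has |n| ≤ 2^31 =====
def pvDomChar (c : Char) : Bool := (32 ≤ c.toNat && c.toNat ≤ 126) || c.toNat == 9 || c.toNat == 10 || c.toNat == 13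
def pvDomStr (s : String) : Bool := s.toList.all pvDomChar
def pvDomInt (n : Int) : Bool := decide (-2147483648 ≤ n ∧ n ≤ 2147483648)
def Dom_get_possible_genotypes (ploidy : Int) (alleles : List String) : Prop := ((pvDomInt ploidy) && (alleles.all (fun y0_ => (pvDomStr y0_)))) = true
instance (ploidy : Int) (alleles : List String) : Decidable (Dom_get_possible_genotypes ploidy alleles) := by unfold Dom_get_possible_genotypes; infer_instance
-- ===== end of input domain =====

-- B replaces A's product-then-sort-then-dedupe with a direct recursive generation of the
-- sorted combinations-with-replacement over the deduplicated alleles, producing each genotype once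
-- instead of enumerating all len(alleles)^ploidy ordered tuples.

-- ===== PORT A =====
-- sort key: alleles.index(x); every sorted element is a member of alleles, so .index never raises
-- and the `.getD 0` default of `index?` is never used.
def get_possible_genotypes (ploidy : Int) (alleles : List String) : List (List String) :=
  let genotypes :=
    (PySem.List.pyRange 0 ploidy 1).foldl
      (fun genotypes _i =>
        alleles.foldl
          (fun temp_genotypes allele =>
            genotypes.foldl
              (fun temp_genotypes genotype => temp_genotypes ++ [genotype ++ [allele]])
              temp_genotypes)
          [])
      [[]]
  genotypes.foldl
    (fun possible_genotypes genotype =>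
      let s := PySem.List.sorted genotype (fun x => (PySem.List.index? alleles x).getD 0) false
      if s ∈ possible_genotypes then possible_genotypes else possible_genotypes ++ [s])
    []

-- ===== PORT B =====
def pvCombos : Nat → List String → List (List String)
  | 0, _ => [[]]
  | _ + 1, [] => []
  | k + 1, a :: pool' =>
      (pvCombos k (a :: pool')).map (fun rest => a :: rest) ++ pvCombos (k + 1) pool'

def get_possible_genotypes_alt (ploidy : Int) (alleles : List String) : List (List String) :=
  let distinct := alleles.foldl (fun acc a => if a ∈ acc then acc else acc ++ [a]) []
  pvCombos ploidy.toNat distinct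

-- ===== PRECONDITION & SPEC =====
def Spec_get_possible_genotypes (ploidy : Int) (alleles : List String) (out : List (List String)) : Prop := out = get_possible_genotypes_alt ploidy alleles
instance (ploidy : Int) (alleles : List String) (out : List (List String)) : Decidable (Spec_get_possible_genotypes ploidy alleles out) := by unfold Spec_get_possible_genotypes; infer_instance

-- ===== CLAIM (what is proved, stated in full; the proofs are below) =====
def Claim_equal_get_possible_genotypes : Prop := ∀ (ploidy : Int) (alleles : List String), Dom_get_possible_genotypes ploidy alleles → Spec_get_possible_genotypes ploidy alleles (get_possible_genotypes ploidy alleles)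

-- ===== LEMMAS AND PROOFS =====

-- ---- proof-side definitions ----

/-- Python's `alleles.index x` as a `Nat` (total on members of `alleles`). -/
def pvKey (alleles : List String) (x : String) : Nat := (PySem.List.index? alleles x).getD 0

/-- ordered insertion by key (what appending then stable-sorting amounts to) -/
def pvIns (k : String → Nat) (a : String) : List String → List String
  | [] => [a]
  | b :: t => if k a ≤ k b then a :: b :: t else b :: pvIns k a t

/-- A's level-n product list, each entry already sorted by key. -/
def pvT (alleles : List String) (k : String → Nat) : Nat → List (List String)
  | 0 => [[]]
  | n + 1 => alleles.flatMap (fun a => (pvT alleles k n).map (pvIns k a))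

/-- A's raw level-n product list. -/
def pvPA (alleles : List String) : Nat → List (List String)
  | 0 => [[]]
  | n + 1 => alleles.flatMap (fun a => (pvPA alleles n).map (· ++ [a]))

/-- A's dedupe fold. -/
def pvDD (acc : List (List String)) (L : List (List String)) : List (List String) :=
  L.foldl (fun acc s => if s ∈ acc then acc else acc ++ [s]) acc

/-- the deduped output accumulated after the first j distinct alleles' blocks -/
def pvPhi (n : Nat) (D : List String) : Nat → List (List String)
  | 0 => []
  | j + 1 => pvPhi n D j ++ (pvCombos n (D.drop j)).map (fun t => D.getD j "" :: t)

-- ---- generic dd lemmas ----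

lemma pvCombos_succ_cons (kk : Nat) (a : String) (pool' : List String) :
    pvCombos (kk + 1) (a :: pool') =
      (pvCombos kk (a :: pool')).map (fun rest => a :: rest) ++ pvCombos (kk + 1) pool' := by
  simp [pvCombos]

lemma pvDD_append (acc X Y : List (List String)) : pvDD acc (X ++ Y) = pvDD (pvDD acc X) Y := by
  simp [pvDD, List.foldl_append]

lemma pvDD_flatMap (l : List String) (f : String → List (List String)) (acc : List (List String)) :
    pvDD acc (l.flatMap f) = l.foldl (fun acc a => pvDD acc (f a)) acc := by
  induction l generalizing acc with
  | nil => rfl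
  | cons a l ih => simp [List.flatMap_cons, pvDD_append, ih]

lemma pvDD_general (L : List (List String)) (acc : List (List String)) :
    pvDD acc L = acc ++ (PySem.Set.ofList L).filter (fun s => decide (s ∉ acc)) := by
  induction L using List.reverseRecOn with
  | nil => simp [pvDD, PySem.Set.ofList]
  | append_singleton L x ih =>
    rw [pvDD_append, ih, PySem.Set.ofList_append_singleton]
    by_cases hxL : x ∈ PySem.Set.ofList L
    · have hadd : (PySem.Set.ofList L).add x = PySem.Set.ofList L := by
        simp [PySem.Set.add, PySem.Set.contains, hxL]
      rw [hadd]
      have hx : x ∈ acc ++ (PySem.Set.ofList L).filter (fun s => decide (s ∉ acc)) := by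
        by_cases hxa : x ∈ acc
        · exact List.mem_append_left _ hxa
        · refine List.mem_append_right _ ?_
          rw [List.mem_filter]
          exact ⟨hxL, by simpa using hxa⟩
      simp only [pvDD, List.foldl_cons, List.foldl_nil]
      rw [if_pos hx]
    · have hadd : (PySem.Set.ofList L).add x = PySem.Set.ofList L ++ [x] := by
        simp [PySem.Set.add, PySem.Set.contains, hxL]
      rw [hadd, List.filter_append]
      by_cases hxa : x ∈ acc
      · have hx : x ∈ acc ++ (PySem.Set.ofList L).filter (fun s => decide (s ∉ acc)) :=
          List.mem_append_left _ hxa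
        simp only [pvDD, List.foldl_cons, List.foldl_nil]
        rw [if_pos hx]
        simp [List.filter_singleton, hxa]
      · have hxf : x ∉ acc ++ (PySem.Set.ofList L).filter (fun s => decide (s ∉ acc)) := by
          intro hmem
          rcases List.mem_append.1 hmem with h | h
          · exact hxa h
          · exact hxL (List.mem_filter.1 h).1
        simp only [pvDD, List.foldl_cons, List.foldl_nil]
        rw [if_neg hxf]
        simp [List.filter_singleton, hxa]

lemma pvDD_nil (L : List (List String)) : pvDD [] L = PySem.Set.ofList L := by
  simp [pvDD_general]

lemma ofList_map_inj {f : List String → List String} (hf : Function.Injective f)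
    (L : List (List String)) :
    PySem.Set.ofList (L.map f) = (PySem.Set.ofList L).map f := by
  induction L using List.reverseRecOn with
  | nil => simp [PySem.Set.ofList]
  | append_singleton L x ih =>
    rw [List.map_append, List.map_singleton, PySem.Set.ofList_append_singleton,
      PySem.Set.ofList_append_singleton, ih]
    by_cases hx : x ∈ PySem.Set.ofList L
    · have h1 : f x ∈ (PySem.Set.ofList L).map f := List.mem_map_of_mem hx
      simp [PySem.Set.add, PySem.Set.contains, hx, h1]
    · have h1 : f x ∉ (PySem.Set.ofList L).map f := by
        intro hm
        rcases List.mem_map.1 hm with ⟨y, hy, hxy⟩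
        exact hx (hf hxy ▸ hy)
      simp [PySem.Set.add, PySem.Set.contains, hx, h1]

-- ---- pvIns lemmas ----

lemma pvIns_perm (k : String → Nat) (a : String) (s : List String) :
    (pvIns k a s).Perm (a :: s) := by
  induction s with
  | nil => exact List.Perm.refl _
  | cons b t ih =>
    unfold pvIns
    split
    · exact List.Perm.refl _
    · exact ((ih.cons b).trans (List.Perm.swap a b t))

lemma pvIns_mem (k : String → Nat) (a x : String) (s : List String) :
    x ∈ pvIns k a s ↔ x = a ∨ x ∈ s := by
  rw [(pvIns_perm k a s).mem_iff]; simp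

lemma pvIns_pairwise (k : String → Nat) (a : String) (s : List String)
    (hs : s.Pairwise (fun x y => k x ≤ k y)) :
    (pvIns k a s).Pairwise (fun x y => k x ≤ k y) := by
  induction s with
  | nil => simp [pvIns]
  | cons b t ih =>
    rw [List.pairwise_cons] at hs
    unfold pvIns
    split
    · rename_i h
      refine List.pairwise_cons.2 ⟨?_, List.pairwise_cons.2 hs⟩
      intro y hy
      rcases hy with _ | hy
      · exact h
      · exact le_trans h (hs.1 y (by assumption))
    · rename_i h
      refine List.pairwise_cons.2 ⟨?_, ih hs.2⟩
      intro y hy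
      rcases (pvIns_mem k a y t).mp hy with rfl | hy'
      · omega
      · exact hs.1 y hy'

lemma pvIns_erase (k : String → Nat) (a : String) (s : List String) :
    (pvIns k a s).erase a = s := by
  induction s with
  | nil => simp [pvIns]
  | cons b t ih =>
    unfold pvIns
    split
    · simp
    · rename_i h
      have hba : b ≠ a := by
        intro rfl_h; subst rfl_h; exact h le_rfl
      rw [List.erase_cons_tail (by simp [hba]), ih]

lemma pvIns_injective (k : String → Nat) (a : String) : Function.Injective (pvIns k a) := by
  intro s t h
  have := congrArg (List.erase · a) h
  simpa [pvIns_erase] using this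

lemma pvIns_front (k : String → Nat) (a : String) (s : List String)
    (h : ∀ e ∈ s, k a ≤ k e) : pvIns k a s = a :: s := by
  cases s with
  | nil => rfl
  | cons b t => simp [pvIns, h b (by simp)]

-- ---- uniqueness of the key-sorted arrangement ----

lemma pv_sorted_unique (k : String → Nat) (al : List String)
    (hinj : ∀ x ∈ al, ∀ y ∈ al, k x = k y → x = y) :
    ∀ (s t : List String), s.Perm t →
      s.Pairwise (fun x y => k x ≤ k y) → t.Pairwise (fun x y => k x ≤ k y) →
      (∀ x ∈ s, x ∈ al) → s = t := by
  intro s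
  induction s with
  | nil =>
    intro t hperm _ _ _
    have := hperm.length_eq
    cases t with
    | nil => rfl
    | cons y t' => simp at this
  | cons x s' ih =>
    intro t hperm hs ht hmem
    cases t with
    | nil => have := hperm.length_eq; simp at this
    | cons y t' =>
      have hys : y ∈ x :: s' := hperm.mem_iff.2 (by simp)
      have hxt : x ∈ y :: t' := hperm.mem_iff.1 (by simp)
      rw [List.pairwise_cons] at hs ht
      have h1 : k x ≤ k y := by
        rcases List.mem_cons.1 hys with h | h
        · rw [h]
        · exact hs.1 _ h
      have h2 : k y ≤ k x := by
        rcases List.mem_cons.1 hxt with h | h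
        · rw [h]
        · exact ht.1 _ h
      have hxal : x ∈ al := hmem x (by simp)
      have hyal : y ∈ al := hmem y (hperm.mem_iff.2 (by simp))
      have hxy : x = y := hinj x hxal y hyal (le_antisymm h1 h2)
      subst hxy
      have hst : s'.Perm t' := hperm.cons_inv
      rw [ih t' hst hs.2 ht.2 (fun e he => hmem e (by simp [he]))]

-- ---- sorting step ----

lemma pv_sorted_append (alleles : List String) (k : String → Nat)
    (hinj : ∀ x ∈ alleles, ∀ y ∈ alleles, k x = k y → x = y)
    (g : List String) (a : String) (hg : ∀ e ∈ g, e ∈ alleles) (ha : a ∈ alleles) :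
    PySem.List.sorted (g ++ [a]) k false = pvIns k a (PySem.List.sorted g k false) := by
  have hperm : (PySem.List.sorted (g ++ [a]) k false).Perm (pvIns k a (PySem.List.sorted g k false)) := by
    refine (PySem.List.sorted_perm _ _ _).trans ?_
    refine (List.perm_append_singleton a g).trans ?_
    exact (((PySem.List.sorted_perm g k false).symm).cons a).trans (pvIns_perm k a _).symm
  refine pv_sorted_unique k alleles hinj _ _ hperm
    (PySem.List.sorted_pairwise _ _)
    (pvIns_pairwise k a _ (PySem.List.sorted_pairwise _ _)) ?_
  intro x hx
  have hx' : x ∈ g ++ [a] := (PySem.List.sorted_perm _ _ _).subset hx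
  rcases List.mem_append.1 hx' with h | h
  · exact hg x h
  · rcases List.mem_singleton.1 h with rfl
    exact ha

-- ---- A-structure lemmas ----

lemma pv_level_eq (alleles : List String) (G : List (List String)) :
    alleles.foldl
      (fun temp_genotypes allele =>
        G.foldl (fun t g => t ++ [g ++ [allele]]) temp_genotypes) [] =
    alleles.flatMap (fun a => G.map (· ++ [a])) := by
  have hpush : ∀ (allele : String) (init : List (List String)),
      G.foldl (fun t g => t ++ [g ++ [allele]]) init = init ++ G.map (· ++ [allele]) := by
    intro allele init
    induction G generalizing init with
    | nil => simp
    | cons g G ih => simp [ih]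
  have key : ∀ (l : List String) (init : List (List String)),
      l.foldl (fun temp allele => G.foldl (fun t g => t ++ [g ++ [allele]]) temp) init
      = init ++ l.flatMap (fun a => G.map (· ++ [a])) := by
    intro l
    induction l with
    | nil => intro init; simp
    | cons a l ih =>
      intro init
      rw [List.foldl_cons, hpush a init, ih, List.flatMap_cons, List.append_assoc]
  simpa using key alleles []

lemma pv_genotypes_eq (alleles : List String) (ploidy : Int) :
    (PySem.List.pyRange 0 ploidy 1).foldl
      (fun genotypes _i =>
        alleles.foldl
          (fun temp_genotypes allele =>
            genotypes.foldl
              (fun temp_genotypes genotype => temp_genotypes ++ [genotype ++ [allele]])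
              temp_genotypes)
          [])
      [[]] = pvPA alleles ploidy.toNat := by
  have hiter : ∀ {σ : Type} (F : σ → σ) (init : σ) (n : Nat),
      (List.range n).foldl (fun s _ => F s) init = F^[n] init := by
    intro σ F init n
    induction n with
    | zero => simp
    | succ n ih => rw [List.range_succ, List.foldl_append]; simp [ih, Function.iterate_succ_apply']
  have hPA : ∀ n : Nat, pvPA alleles n =
      (fun S => alleles.flatMap (fun a => S.map (· ++ [a])))^[n] [[]] := by
    intro n
    induction n with
    | zero => rfl
    | succ n ih => rw [Function.iterate_succ_apply', ← ih]; rfl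
  rw [PySem.List.pyRange_one, List.foldl_map]
  simp only [pv_level_eq]
  rw [hiter, hPA]
  norm_num

lemma pvPA_mem (alleles : List String) (n : Nat) :
    ∀ g ∈ pvPA alleles n, ∀ e ∈ g, e ∈ alleles := by
  induction n with
  | zero =>
    intro g hg e he
    simp [pvPA] at hg
    subst hg
    simp at he
  | succ n ih =>
    intro g hg e he
    simp only [pvPA, List.mem_flatMap, List.mem_map] at hg
    obtain ⟨a, ha, g', hg', rfl⟩ := hg
    rcases List.mem_append.1 he with h | h
    · exact ih g' hg' e h
    · rcases List.mem_singleton.1 h with rfl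
      exact ha

lemma pv_map_sorted_PA (alleles : List String) (k : String → Nat)
    (hinj : ∀ x ∈ alleles, ∀ y ∈ alleles, k x = k y → x = y) (n : Nat) :
    (pvPA alleles n).map (fun g => PySem.List.sorted g k false) = pvT alleles k n := by
  induction n with
  | zero =>
    simp [pvPA, pvT]
    exact PySem.List.sorted_eq_self_of_pairwise _ _ (by simp)
  | succ n ih =>
    simp only [pvPA, pvT, List.map_flatMap]
    refine List.flatMap_congr ?_
    intro a ha
    rw [List.map_map, ← ih, List.map_map]
    refine List.map_congr_left ?_
    intro g hg
    exact pv_sorted_append alleles k hinj g a (pvPA_mem alleles n g hg) ha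

lemma pvCombos_mem (k : String → Nat) :
    ∀ (n : Nat) (pool : List String), pool.Pairwise (fun x y => k x < k y) →
    ∀ s, s ∈ pvCombos n pool ↔
      (s.length = n ∧ s.Pairwise (fun x y => k x ≤ k y) ∧ ∀ e ∈ s, e ∈ pool) := by
  intro n
  induction n with
  | zero =>
    intro pool _ s
    constructor
    · intro hs
      simp only [pvCombos] at hs
      rcases List.mem_singleton.1 hs with rfl
      simp
    · rintro ⟨hlen, -, -⟩
      rcases List.length_eq_zero_iff.1 hlen with rfl
      simp [pvCombos]
  | succ n ihn =>
    intro pool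
    induction pool with
    | nil =>
      intro _ s
      constructor
      · intro hs; simp [pvCombos] at hs
      · rintro ⟨hlen, -, hmem⟩
        cases s with
        | nil => simp at hlen
        | cons h t => exact absurd (hmem h (by simp)) (by simp)
    | cons x pool' ihp =>
      intro hP s
      have hP' : pool'.Pairwise (fun a b => k a < k b) := (List.pairwise_cons.1 hP).2
      have hx : ∀ e ∈ pool', k x < k e := (List.pairwise_cons.1 hP).1
      simp only [pvCombos, List.mem_append, List.mem_map]
      constructor
      · rintro (⟨rest, hrest, rfl⟩ | hs)
        · obtain ⟨hlen, hpw, hmem⟩ := (ihn (x :: pool') hP rest).1 hrest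
          refine ⟨by simp [hlen], ?_, ?_⟩
          · refine List.pairwise_cons.2 ⟨?_, hpw⟩
            intro e he
            rcases List.mem_cons.1 (hmem e he) with rfl | he'
            · exact le_rfl
            · exact le_of_lt (hx e he')
          · intro e he
            rcases List.mem_cons.1 he with rfl | he'
            · exact List.mem_cons_self
            · exact hmem e he'
        · obtain ⟨hlen, hpw, hmem⟩ := (ihp hP' s).1 hs
          exact ⟨hlen, hpw, fun e he => List.mem_cons_of_mem x (hmem e he)⟩
      · rintro ⟨hlen, hpw, hmem⟩
        cases s with
        | nil => simp at hlen
        | cons h t =>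
          by_cases hhx : h = x
          · subst hhx
            left
            refine ⟨t, (ihn (h :: pool') hP t).2 ⟨by simpa using hlen,
              (List.pairwise_cons.1 hpw).2, fun e he => hmem e (List.mem_cons_of_mem _ he)⟩, rfl⟩
          · right
            have hhp' : h ∈ pool' := by
              rcases List.mem_cons.1 (hmem h List.mem_cons_self) with h' | h'
              · exact absurd h' hhx
              · exact h'
            have hall : ∀ e ∈ h :: t, e ∈ pool' := by
              intro e he
              rcases List.mem_cons.1 (hmem e he) with rfl | he'
              · exfalso
                rcases List.mem_cons.1 he with h' | h'
                · exact hhx h'.symm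
                · have h1 : k h ≤ k e := (List.pairwise_cons.1 hpw).1 e h'
                  have h2 : k e < k h := hx h hhp'
                  omega
              · exact he'
            exact (ihp hP' (h :: t)).2 ⟨hlen, hpw, hall⟩

lemma pvCombos_filter_tail (k : String → Nat) (n : Nat) (x : String) (pool' : List String)
    (hP : (x :: pool').Pairwise (fun a b => k a < k b)) :
    (pvCombos n (x :: pool')).filter (fun s => decide (∀ e ∈ s, e ∈ pool')) = pvCombos n pool' := by
  have hP' : pool'.Pairwise (fun a b => k a < k b) := (List.pairwise_cons.1 hP).2
  have hxp : x ∉ pool' := by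
    intro hmem
    exact absurd ((List.pairwise_cons.1 hP).1 x hmem) (by omega)
  cases n with
  | zero => simp [pvCombos]
  | succ n =>
    rw [show pvCombos (n + 1) (x :: pool') =
        (pvCombos n (x :: pool')).map (fun rest => x :: rest) ++ pvCombos (n + 1) pool' from by
          simp [pvCombos], List.filter_append]
    have h1 : ((pvCombos n (x :: pool')).map (fun rest => x :: rest)).filter
        (fun s => decide (∀ e ∈ s, e ∈ pool')) = [] := by
      rw [List.filter_eq_nil_iff]
      intro u hu
      rcases List.mem_map.1 hu with ⟨rest, -, rfl⟩
      simp only [decide_eq_true_eq]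
      intro hall
      exact hxp (hall x List.mem_cons_self)
    have h2 : (pvCombos (n + 1) pool').filter (fun s => decide (∀ e ∈ s, e ∈ pool')) =
        pvCombos (n + 1) pool' := by
      rw [List.filter_eq_self]
      intro s hs
      simp only [decide_eq_true_eq]
      exact ((pvCombos_mem k (n + 1) pool' hP' s).1 hs).2.2
    rw [h1, h2, List.nil_append]

lemma pvCombos_filter_drop (k : String → Nat) (n : Nat) (pool : List String)
    (hP : pool.Pairwise (fun a b => k a < k b)) :
    ∀ j, j ≤ pool.length →
    (pvCombos n pool).filter (fun s => decide (∀ e ∈ s, e ∈ pool.drop j)) = pvCombos n (pool.drop j) := by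
  intro j
  induction j with
  | zero =>
    intro _
    simp only [List.drop_zero]
    rw [List.filter_eq_self]
    intro s hs
    simp only [decide_eq_true_eq]
    exact ((pvCombos_mem k n pool hP s).1 hs).2.2
  | succ j ih =>
    intro hj
    have hjlt : j < pool.length := by omega
    have hdj : pool.drop j = pool[j] :: pool.drop (j + 1) := List.drop_eq_getElem_cons hjlt
    have hsub : ∀ e, e ∈ pool.drop (j + 1) → e ∈ pool.drop j := by
      intro e he
      rw [hdj]
      exact List.mem_cons_of_mem _ he
    have habs : (pvCombos n pool).filter (fun s => decide (∀ e ∈ s, e ∈ pool.drop (j + 1))) =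
        ((pvCombos n pool).filter (fun s => decide (∀ e ∈ s, e ∈ pool.drop j))).filter
          (fun s => decide (∀ e ∈ s, e ∈ pool.drop (j + 1))) := by
      rw [List.filter_filter]
      apply List.filter_congr
      intro s _
      by_cases h : ∀ e ∈ s, e ∈ pool.drop (j + 1)
      · have h2 : ∀ e ∈ s, e ∈ pool.drop j := fun e he => hsub e (h e he)
        simp [h]
        exact fun _ => h2
      · simp [h]
    rw [habs, ih (by omega)]
    have hPj : (pool.drop j).Pairwise (fun a b => k a < k b) :=
      hP.sublist (List.drop_sublist _ _)
    rw [hdj] at hPj ⊢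
    exact pvCombos_filter_tail k n pool[j] (pool.drop (j + 1)) hPj

-- ---- key/suffix lemmas over the distinct list D ----

lemma pv_mem_drop_iff (k : String → Nat) (D : List String)
    (hP : D.Pairwise (fun x y => k x < k y)) (i : Nat) (hi : i < D.length) (e : String)
    (he : e ∈ D) : e ∈ D.drop i ↔ k D[i] ≤ k e := by
  have hdi : D.drop i = D[i] :: D.drop (i + 1) := List.drop_eq_getElem_cons hi
  have hPd : (D.drop i).Pairwise (fun x y => k x < k y) := hP.sublist (List.drop_sublist _ _)
  constructor
  · intro hmem
    rw [hdi] at hmem hPd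
    rcases List.mem_cons.1 hmem with rfl | hmem'
    · exact le_rfl
    · exact le_of_lt ((List.pairwise_cons.1 hPd).1 e hmem')
  · intro hke
    by_contra hnot
    have hsplit : D = D.take i ++ D.drop i := (List.take_append_drop i D).symm
    have he' : e ∈ D.take i ++ D.drop i := hsplit ▸ he
    rcases List.mem_append.1 he' with htake | hdrop
    · have hPsplit : (D.take i ++ D.drop i).Pairwise (fun x y => k x < k y) := by
        rw [← hsplit]; exact hP
      have hcross := (List.pairwise_append.1 hPsplit).2.2
      have : k e < k D[i] := hcross e htake D[i] (by rw [hdi]; exact List.mem_cons_self)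
      omega
    · exact hnot hdrop

lemma pv_idx_le (k : String → Nat) (D : List String)
    (hP : D.Pairwise (fun x y => k x < k y)) (i j : Nat) (hi : i < D.length)
    (hj : j < D.length) (h : k D[i] ≤ k D[j]) : i ≤ j := by
  by_contra hc
  have hji : j < i := by omega
  have := (List.pairwise_iff_getElem.mp hP) j i hj hi hji
  omega

-- ---- Phi lemmas ----

lemma pvPhi_total (n : Nat) (D : List String) :
    ∀ j, j ≤ D.length → pvPhi n D j ++ pvCombos (n + 1) (D.drop j) = pvCombos (n + 1) D := by
  intro j
  induction j with
  | zero => intro _; simp [pvPhi]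
  | succ j ih =>
    intro hj
    have hjlt : j < D.length := by omega
    have hdj : D.drop j = D[j] :: D.drop (j + 1) := List.drop_eq_getElem_cons hjlt
    have hgd : D.getD j "" = D[j] := List.getD_eq_getElem D "" hjlt
    rw [← ih (by omega)]
    simp only [pvPhi, List.append_assoc]
    congr 1
    rw [hgd]
    conv_rhs => rw [hdj, pvCombos_succ_cons n (D[j]) (D.drop (j + 1)), ← hdj]

lemma pvPhi_mem (n : Nat) (D : List String) (j : Nat) (hj : j ≤ D.length) (x : List String) :
    x ∈ pvPhi n D j ↔ ∃ i, i < j ∧ ∃ (hi : i < D.length) (t : List String),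
      x = D[i] :: t ∧ t ∈ pvCombos n (D.drop i) := by
  induction j with
  | zero => simp [pvPhi]
  | succ j ih =>
    have hjlt : j < D.length := by omega
    have hgd : D.getD j "" = D[j] := List.getD_eq_getElem D "" hjlt
    simp only [pvPhi, List.mem_append, List.mem_map]
    rw [ih (by omega)]
    constructor
    · rintro (⟨i, hij, hi, t, rfl, ht⟩ | ⟨t, ht, rfl⟩)
      · exact ⟨i, by omega, hi, t, rfl, ht⟩
      · exact ⟨j, by omega, hjlt, t, by rw [hgd], ht⟩
    · rintro ⟨i, hij, hi, t, rfl, ht⟩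
      by_cases hij' : i < j
      · exact Or.inl ⟨i, hij', hi, t, rfl, ht⟩
      · have : i = j := by omega
        subst this
        exact Or.inr ⟨t, ht, by rw [hgd]⟩

lemma pv_mem_phi_of_canon (k : String → Nat) (D : List String)
    (hP : D.Pairwise (fun x y => k x < k y)) (n j : Nat) (hj : j ≤ D.length)
    (x : List String) (hx : x.Pairwise (fun a b => k a ≤ k b)) (hmem : ∀ e ∈ x, e ∈ D)
    (i : Nat) (hi : i < D.length) (t : List String) (hxd : x = D[i] :: t)
    (hij : i < j) (hlen : t.length = n) : x ∈ pvPhi n D j := by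
  subst hxd
  have hPd : (D.drop i).Pairwise (fun x y => k x < k y) := hP.sublist (List.drop_sublist _ _)
  have ht : t ∈ pvCombos n (D.drop i) := by
    refine (pvCombos_mem k n (D.drop i) hPd t).2 ⟨hlen, (List.pairwise_cons.1 hx).2, ?_⟩
    intro e he
    refine (pv_mem_drop_iff k D hP i hi e (hmem e (List.mem_cons_of_mem _ he))).2 ?_
    exact (List.pairwise_cons.1 hx).1 e he
  exact (pvPhi_mem n D j hj _).2 ⟨i, hij, hi, t, rfl, ht⟩

lemma pv_ins_mem_phi (k : String → Nat) (D : List String)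
    (hP : D.Pairwise (fun x y => k x < k y)) (n j : Nat) (hj : j ≤ D.length)
    (x : List String) (hxpw : x.Pairwise (fun a b => k a ≤ k b))
    (hxmem : ∀ e ∈ x, e ∈ D) (hlenx : x.length = n + 1)
    (e : String) (he : e ∈ x) (hetake : e ∈ D.take j) : x ∈ pvPhi n D j := by
  cases x with
  | nil => simp at hlenx
  | cons h t =>
    obtain ⟨i', hi', hDi'⟩ := List.getElem_of_mem (hxmem h List.mem_cons_self)
    obtain ⟨it, hit, hDit⟩ := List.getElem_of_mem hetake
    have hitb : it < min j D.length := by simpa [List.length_take] using hit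
    have hitlen : it < D.length := by omega
    have hitj : it < j := by omega
    have hDit' : D[it] = e := by
      rw [← hDit]
      exact (List.getElem_take).symm
    have hke : k h ≤ k e := by
      rcases List.mem_cons.1 he with rfl | het
      · exact le_rfl
      · exact (List.pairwise_cons.1 hxpw).1 e het
    have hii : i' ≤ it := pv_idx_le k D hP i' it hi' hitlen (by rw [hDi', hDit']; exact hke)
    exact pv_mem_phi_of_canon k D hP n j hj (h :: t) hxpw hxmem i' hi' t (by rw [hDi'])
      (by omega) (by simpa using hlenx)

-- ---- the fold invariant ----

lemma pv_fold_inv (alleles : List String) (k : String → Nat) (D : List String)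
    (hD : D = PySem.Set.ofList alleles)
    (hP : D.Pairwise (fun x y => k x < k y))
    (hmemD : ∀ x, x ∈ D ↔ x ∈ alleles)
    (n : Nat) (hT : PySem.Set.ofList (pvT alleles k n) = pvCombos n D) :
    ∀ (rest pre : List String) (j : Nat), alleles = pre ++ rest →
      PySem.Set.ofList pre = D.take j → j ≤ D.length →
      rest.foldl (fun acc a => pvDD acc ((pvT alleles k n).map (pvIns k a))) (pvPhi n D j) =
        pvPhi n D D.length := by
  intro rest
  induction rest with
  | nil =>
    intro pre j hsplit hpre hjle
    rw [List.append_nil] at hsplit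
    subst hsplit
    have hDj : D = D.take j := by conv_lhs => rw [hD, hpre]
    have hlen : D.length ≤ j := by
      have := congrArg List.length hDj
      rw [List.length_take] at this
      omega
    have hjD : j = D.length := le_antisymm hjle hlen
    rw [List.foldl_nil, hjD]
  | cons a rest' ih =>
    intro pre j hsplit hpre hjle
    rw [List.foldl_cons]
    have ha : a ∈ alleles := by rw [hsplit]; simp
    have haD : a ∈ D := (hmemD a).2 ha
    have hblock : pvDD (pvPhi n D j) ((pvT alleles k n).map (pvIns k a)) =
        pvPhi n D j ++ ((pvCombos n D).map (pvIns k a)).filter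
          (fun s => decide (s ∉ pvPhi n D j)) := by
      rw [pvDD_general, ofList_map_inj (pvIns_injective k a), hT]
    by_cases hain : a ∈ pre
    · -- duplicate allele: every element of the block is already in the accumulator
      have haj : a ∈ D.take j := by
        rw [← hpre]
        exact (PySem.Set.mem_ofList pre a).2 hain
      have hfilter : ((pvCombos n D).map (pvIns k a)).filter
          (fun s => decide (s ∉ pvPhi n D j)) = [] := by
        rw [List.filter_eq_nil_iff]
        intro u hu
        rcases List.mem_map.1 hu with ⟨t, htmem, hteq⟩
        subst hteq
        obtain ⟨htlen, htpw, htD⟩ := (pvCombos_mem k n D hP t).1 htmem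
        have hxmem : ∀ e ∈ pvIns k a t, e ∈ D := by
          intro e he
          rcases (pvIns_mem k a e t).1 he with rfl | he'
          · exact haD
          · exact htD e he'
        have hxin : pvIns k a t ∈ pvPhi n D j :=
          pv_ins_mem_phi k D hP n j hjle (pvIns k a t)
            (pvIns_pairwise k a t htpw) hxmem
            (by rw [(pvIns_perm k a t).length_eq]; simp [htlen])
            a ((pvIns_mem k a a t).2 (Or.inl rfl)) haj
        simp [hxin]
      rw [hblock, hfilter, List.append_nil]
      refine ih (pre ++ [a]) j (by rw [hsplit]; simp) ?_ hjle
      rw [PySem.Set.ofList_append_singleton, hpre]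
      have hcont : (D.take j).contains a = true := by simp [haj]
      simp only [PySem.Set.add, PySem.Set.contains]
      rw [if_pos hcont]
    · -- first occurrence of a new allele: a = D[j]
      have hanotset : a ∉ D.take j := by
        rw [← hpre]
        intro h
        exact hain ((PySem.Set.mem_ofList pre a).1 h)
      have hofl : PySem.Set.ofList (pre ++ [a]) = D.take j ++ [a] := by
        rw [PySem.Set.ofList_append_singleton, hpre]
        have hcont : ¬ ((D.take j).contains a = true) := by simp [hanotset]
        simp only [PySem.Set.add, PySem.Set.contains]
        rw [if_neg hcont]
      obtain ⟨r, hr⟩ : ∃ r, D = (D.take j ++ [a]) ++ r := by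
        have hsplit2 : alleles = (pre ++ [a]) ++ rest' := by rw [hsplit]; simp
        refine ⟨(PySem.Set.ofList rest').filter
          (fun y => !(PySem.Set.contains (D.take j ++ [a]) y)), ?_⟩
        conv_lhs => rw [hD, hsplit2, PySem.Set.ofList_append,
          PySem.Set.update_eq_append_filter, hofl]
      have htlen : (D.take j).length = j := by
        simp [List.length_take]
        omega
      have hjlt : j < D.length := by
        have := congrArg List.length hr
        simp at this
        omega
      have haDj? : D[j]? = some a := by
        conv_lhs => rw [hr, List.append_assoc]
        rw [List.getElem?_append_right (by omega)]
        simp [htlen]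
      have haDj : D[j] = a := by
        have h5 : D[j]? = some (D[j]) := List.getElem?_eq_getElem hjlt
        rw [haDj?] at h5
        exact (Option.some_inj.1 h5).symm
      have htake1 : D.take (j + 1) = D.take j ++ [a] := by
        rw [List.take_add_one, haDj?]
        rfl
      have hfilter : ((pvCombos n D).map (pvIns k a)).filter
          (fun s => decide (s ∉ pvPhi n D j)) =
          (pvCombos n (D.drop j)).map (fun t => a :: t) := by
        rw [List.filter_map]
        have hcong : (pvCombos n D).filter ((fun s => decide (s ∉ pvPhi n D j)) ∘ pvIns k a) =
            (pvCombos n D).filter (fun s => decide (∀ e ∈ s, e ∈ D.drop j)) := by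
          apply List.filter_congr
          intro t htmem
          obtain ⟨htlen, htpw, htD⟩ := (pvCombos_mem k n D hP t).1 htmem
          simp only [Function.comp]
          rw [decide_eq_decide]
          constructor
          · intro hnot e he
            by_contra hedrop
            have heD : e ∈ D := htD e he
            have hetake : e ∈ D.take j := by
              have h2 : e ∈ D.take j ++ D.drop j := by
                rw [List.take_append_drop]
                exact heD
              rcases List.mem_append.1 h2 with h3 | h3
              · exact h3
              · exact absurd h3 hedrop
            refine hnot (pv_ins_mem_phi k D hP n j (le_of_lt hjlt) (pvIns k a t)
              (pvIns_pairwise k a t htpw) ?_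
              (by rw [(pvIns_perm k a t).length_eq]; simp [htlen])
              e ((pvIns_mem k a e t).2 (Or.inr he)) hetake)
            intro e' he'
            rcases (pvIns_mem k a e' t).1 he' with rfl | he''
            · exact haD
            · exact htD e' he''
          · intro hall
            have hfront : pvIns k a t = a :: t := by
              refine pvIns_front k a t ?_
              intro e he
              have heD : e ∈ D := List.drop_subset _ _ (hall e he)
              have := (pv_mem_drop_iff k D hP j hjlt e heD).1 (hall e he)
              rw [haDj] at this
              exact this
            intro hmem
            rw [hfront] at hmem
            obtain ⟨i, hij, hi, t', heq, -⟩ := (pvPhi_mem n D j (le_of_lt hjlt) _).1 hmem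
            have hai : a = D[i] := by injection heq with h1 h2
            have hlt2 := (List.pairwise_iff_getElem.mp hP) i j hi hjlt hij
            rw [← hai, ← haDj] at hlt2
            omega
        rw [hcong, pvCombos_filter_drop k n D hP j (le_of_lt hjlt)]
        apply List.map_congr_left
        intro t ht
        obtain ⟨-, -, htmem⟩ :=
          (pvCombos_mem k n (D.drop j) (hP.sublist (List.drop_sublist _ _)) t).1 ht
        refine pvIns_front k a t ?_
        intro e he
        have heD : e ∈ D := List.drop_subset _ _ (htmem e he)
        have := (pv_mem_drop_iff k D hP j hjlt e heD).1 (htmem e he)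
        rw [haDj] at this
        exact this
      have hphi : pvPhi n D j ++ (pvCombos n (D.drop j)).map (fun t => a :: t) =
          pvPhi n D (j + 1) := by
        simp only [pvPhi]
        congr 2
        rw [List.getD_eq_getElem D "" hjlt, haDj]
      rw [hblock, hfilter, hphi]
      exact ih (pre ++ [a]) (j + 1) (by rw [hsplit]; simp) (by rw [hofl, htake1]) (by omega)

lemma pv_main (alleles : List String) (k : String → Nat) (D : List String)
    (hD : D = PySem.Set.ofList alleles)
    (hP : D.Pairwise (fun x y => k x < k y))
    (hinj : ∀ x ∈ alleles, ∀ y ∈ alleles, k x = k y → x = y)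
    (hmemD : ∀ x, x ∈ D ↔ x ∈ alleles) :
    ∀ n : Nat, pvDD [] (pvT alleles k n) = pvCombos n D := by
  intro n
  induction n with
  | zero => simp [pvT, pvDD, pvCombos]
  | succ n ih =>
    have hT : PySem.Set.ofList (pvT alleles k n) = pvCombos n D := by rw [← pvDD_nil, ih]
    have h1 : pvDD [] (pvT alleles k (n + 1)) =
        alleles.foldl (fun acc a => pvDD acc ((pvT alleles k n).map (pvIns k a))) [] := by
      simp only [pvT]
      rw [pvDD_flatMap]
    rw [h1]
    have h2 := pv_fold_inv alleles k D hD hP hmemD n hT alleles [] 0 rfl rfl (by omega)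
    rw [show pvPhi n D 0 = [] from rfl] at h2
    rw [h2]
    have h3 := pvPhi_total n D D.length le_rfl
    rw [List.drop_length] at h3
    rw [show pvCombos (n + 1) ([] : List String) = [] from by simp [pvCombos]] at h3
    simpa using h3

-- ---- instantiation facts ----

lemma pvKey_inj (alleles : List String) :
    ∀ x ∈ alleles, ∀ y ∈ alleles, pvKey alleles x = pvKey alleles y → x = y := by
  intro x hx y hy hkey
  obtain ⟨i, hi⟩ := Option.isSome_iff_exists.1 ((PySem.List.index?_isSome_iff alleles x).2 hx)
  obtain ⟨j, hj⟩ := Option.isSome_iff_exists.1 ((PySem.List.index?_isSome_iff alleles y).2 hy)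
  have hij : i = j := by
    unfold pvKey at hkey
    rw [hi, hj] at hkey
    simpa using hkey
  subst hij
  obtain ⟨hilen, hxi, -⟩ := PySem.List.getElem_of_index?_eq_some hi
  obtain ⟨hjlen, hyj, -⟩ := PySem.List.getElem_of_index?_eq_some hj
  rw [← hxi, ← hyj]

lemma pv_ofList_pairwise_key (alleles : List String) :
    (PySem.Set.ofList alleles).Pairwise (fun x y => pvKey alleles x < pvKey alleles y) := by
  have hstable : ∀ (xs : List String) (x y : String), y ∈ xs →
      pvKey (xs ++ [x]) y = pvKey xs y := by
    intro xs x y hy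
    unfold pvKey
    rw [PySem.List.index?_append_of_mem [x] hy]
  have hself : ∀ (xs : List String) (x : String), x ∉ xs →
      pvKey (xs ++ [x]) x = xs.length := by
    intro xs x hx
    unfold pvKey
    rw [PySem.List.index?_append_singleton_self xs x hx]
    rfl
  have hlt : ∀ (xs : List String) (y : String), y ∈ xs → pvKey xs y < xs.length := by
    intro xs y hy
    obtain ⟨i, hi⟩ := Option.isSome_iff_exists.1 ((PySem.List.index?_isSome_iff xs y).2 hy)
    obtain ⟨pre, suf, hdecomp, hprelen, -⟩ := (PySem.List.index?_eq_some_iff xs y i).1 hi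
    have hxs : xs.length = pre.length + 1 + suf.length := by
      subst hdecomp; simp; omega
    unfold pvKey
    rw [hi]
    simp
    omega
  induction alleles using List.reverseRecOn with
  | nil => simp [PySem.Set.ofList]
  | append_singleton xs x ih =>
    rw [PySem.Set.ofList_append_singleton]
    have hmemset : ∀ y, y ∈ PySem.Set.ofList xs → y ∈ xs := by
      intro y hy
      exact (PySem.Set.mem_ofList xs y).1 hy
    have hwithin : (PySem.Set.ofList xs).Pairwise
        (fun a b => pvKey (xs ++ [x]) a < pvKey (xs ++ [x]) b) := by
      refine List.Pairwise.imp_of_mem ?_ ih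
      intro a b ha hb hab
      rw [hstable xs x a (hmemset a ha), hstable xs x b (hmemset b hb)]
      exact hab
    by_cases hx : x ∈ xs
    · have hadd : (PySem.Set.ofList xs).add x = PySem.Set.ofList xs := by
        simp [PySem.Set.add, PySem.Set.contains, (PySem.Set.mem_ofList xs x).2 hx]
      rw [hadd]
      exact hwithin
    · have hadd : (PySem.Set.ofList xs).add x = PySem.Set.ofList xs ++ [x] := by
        have : x ∉ PySem.Set.ofList xs := fun h => hx (hmemset x h)
        simp [PySem.Set.add, PySem.Set.contains, this]
      rw [hadd, List.pairwise_append]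
      refine ⟨hwithin, by simp, ?_⟩
      intro a ha b hb
      rcases List.mem_singleton.1 hb with rfl
      rw [hstable xs b a (hmemset a ha), hself xs b hx]
      exact lt_of_lt_of_le (hlt xs a (hmemset a ha)) le_rfl

lemma pv_distinct_eq (alleles : List String) :
    alleles.foldl (fun acc a => if a ∈ acc then acc else acc ++ [a]) [] =
      PySem.Set.ofList alleles := by
  suffices h : ∀ (l acc : List String),
      l.foldl (fun acc a => if a ∈ acc then acc else acc ++ [a]) acc = l.foldl PySem.Set.add acc by
    rw [h]
    rfl
  intro l
  induction l with
  | nil => intro acc; rfl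
  | cons a l ih =>
    intro acc
    simp only [List.foldl_cons]
    rw [ih]
    congr 1
    simp [PySem.Set.add, PySem.Set.contains]

-- ===== VERDICT (by name: the statement is the Claim_ definition above) =====
theorem get_possible_genotypes_spec : Claim_equal_get_possible_genotypes := by
  intro ploidy alleles _
  unfold Spec_get_possible_genotypes
  have e1 : get_possible_genotypes ploidy alleles =
      pvDD [] ((pvPA alleles ploidy.toNat).map
        (fun g => PySem.List.sorted g (fun x => (PySem.List.index? alleles x).getD 0) false)) := by
    unfold get_possible_genotypes
    rw [pv_genotypes_eq]
    conv_rhs => rw [pvDD]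
    rw [List.foldl_map]
  have e2 : get_possible_genotypes_alt ploidy alleles =
      pvCombos ploidy.toNat (PySem.Set.ofList alleles) := by
    unfold get_possible_genotypes_alt
    rw [pv_distinct_eq]
  rw [e1, e2,
    pv_map_sorted_PA alleles (fun x => (PySem.List.index? alleles x).getD 0)
      (pvKey_inj alleles) ploidy.toNat]
  exact pv_main alleles (fun x => (PySem.List.index? alleles x).getD 0)
    (PySem.Set.ofList alleles) rfl (pv_ofList_pairwise_key alleles) (pvKey_inj alleles)
    (fun x => PySem.Set.mem_ofList alleles x) ploidy.toNat
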